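-- pv_equiv track=rewrite | github.com/emc255/python-algorithm-design | questions/medium/hash_table/minimum_number_of_pushes_to_type_word_ii.py | minimum_pushes_v2
-- ===== SOURCE A (Python) =====
-- from collections import Counter
--
-- def minimum_pushes_v2(word: str) -> int:
--     result = 0
--     slots_per_multiplier = 8
--     word_counter = Counter(word)
--     values = sorted(word_counter.values(), reverse=True)
--
--     for i, count in enumerate(values):
--         multiplier = i // slots_per_multiplier + 1
--         result += count * multiplier
--
--     return result
-- ===== SOURCE B (Python) =====
-- from collections import Counter
--
--
-- def minimum_pushes_v2(word: str) -> int: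
--     # Bucket by frequency value (a Counter of frequencies) instead of sorting:
--     # a tier block of equal frequencies occupies a known rank range, whose
--     # multiplier total has a closed form.
--     fof = Counter(Counter(word).values())
--
--     def tiers(m):  # sum of i // 8 for i in range(m)
--         q, r = divmod(m, 8)
--         return 4 * q * (q - 1) + q * r
--
--     total = 0
--     for f, c in fof.items():
--         g = sum(c2 for f2, c2 in fof.items() if f2 > f)
--         total += f * (c + tiers(g + c) - tiers(g))
--     return total
-- ===== Notes on version B (the rewrite author's own statement) =====
-- stated objective: alternative
-- what changed: B never sorts: it builds a Counter of the frequency values and, for each distinct frequency, computes its rank range from the number of strictly larger frequencies and adds its contribution via a closed-form tier-sum formula, instead of A's sort-descending plus per-index i//8 enumerate loop.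
import Mathlib
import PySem

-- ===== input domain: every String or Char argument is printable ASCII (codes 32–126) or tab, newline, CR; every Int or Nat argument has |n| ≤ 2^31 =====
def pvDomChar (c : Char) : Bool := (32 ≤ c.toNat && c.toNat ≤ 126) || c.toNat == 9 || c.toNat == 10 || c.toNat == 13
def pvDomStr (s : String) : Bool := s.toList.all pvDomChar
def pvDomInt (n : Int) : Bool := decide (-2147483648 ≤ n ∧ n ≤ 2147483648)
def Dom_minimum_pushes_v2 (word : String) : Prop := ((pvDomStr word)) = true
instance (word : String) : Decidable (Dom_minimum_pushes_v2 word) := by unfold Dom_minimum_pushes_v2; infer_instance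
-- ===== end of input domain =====

-- B replaces A's sort-descending + per-index (i // 8) enumerate loop by a Counter of the
-- frequency values: each distinct frequency's rank block is located by the number of strictly
-- larger frequencies and contributes via a closed-form tier sum; objective: alternative
-- algorithm (no comparison sort), same return value.

-- ===== PORT A =====
def minimum_pushes_v2 (word : String) : Int :=
  let result : Int := 0
  let word_counter := PySem.Dict.counter word.toList
  let values := PySem.List.sorted word_counter.values id true
  (PySem.List.enumerate values 0).foldl
    (fun result ic => result + ic.2 * (PySem.Int.floordiv ic.1 8 + 1)) result

-- ===== PORT B =====
-- helper `tiers(m)` of Source B: closed form for sum of i // 8 over i in range(m)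
def pvTiers (m : Int) : Int :=
  let q := PySem.Int.floordiv m 8
  let r := PySem.Int.mod m 8
  4 * q * (q - 1) + q * r

-- the generator expression `sum(c2 for f2, c2 in fof.items() if f2 > f)` of Source B
def pvGreaterSum (fof : PySem.Dict Int Int) (f : Int) : Int :=
  ((fof.items.filter (fun p => decide (f < p.1))).map (fun p => p.2)).sum

def minimum_pushes_v2_alt (word : String) : Int :=
  let fof := PySem.Dict.counter (PySem.Dict.counter word.toList).values
  fof.items.foldl
    (fun total fc =>
      total + fc.1 * (fc.2 + pvTiers (pvGreaterSum fof fc.1 + fc.2)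
        - pvTiers (pvGreaterSum fof fc.1)))
    0

-- ===== PRECONDITION & SPEC =====
def Spec_minimum_pushes_v2 (word : String) (out : Int) : Prop := out = minimum_pushes_v2_alt word
instance (word : String) (out : Int) : Decidable (Spec_minimum_pushes_v2 word out) := by unfold Spec_minimum_pushes_v2; infer_instance

-- ===== CLAIM (what is proved, stated in full; the proofs are below) =====
def Claim_equal_minimum_pushes_v2 : Prop := ∀ (word : String), Dom_minimum_pushes_v2 word → Spec_minimum_pushes_v2 word (minimum_pushes_v2 word)

-- ===== LEMMAS AND PROOFS =====

lemma pvTiers_succ (m : Int) :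
    pvTiers (m + 1) = pvTiers m + PySem.Int.floordiv m 8 := by
  unfold pvTiers
  rw [PySem.Int.floordiv_eq_ediv_of_pos (by norm_num),
      PySem.Int.floordiv_eq_ediv_of_pos (by norm_num),
      PySem.Int.mod_eq_emod_of_pos (by norm_num),
      PySem.Int.mod_eq_emod_of_pos (by norm_num)]
  simp only []
  by_cases h : m % 8 = 7
  · have hq : (m + 1) / 8 = m / 8 + 1 := by omega
    have hr : (m + 1) % 8 = 0 := by omega
    rw [hq, hr, h]; ring
  · have hq : (m + 1) / 8 = m / 8 := by omega
    have hr : (m + 1) % 8 = m % 8 + 1 := by omega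
    rw [hq, hr]; ring

lemma pv_block_sum (c : Nat) : ∀ (g : Nat) (f : Int),
    ((PySem.List.enumerate (List.replicate c f) (g : Int)).map
      (fun ic => ic.2 * (PySem.Int.floordiv ic.1 8 + 1))).sum
    = f * ((c : Int) + pvTiers ((g + c : Nat) : Int) - pvTiers ((g : Nat) : Int)) := by
  induction c with
  | zero => intro g f; simp [PySem.List.enumerate_nil]
  | succ c ih =>
    intro g f
    have h1 : ((g : Int) + 1) = ((g + 1 : Nat) : Int) := by push_cast; ring
    simp only [List.replicate_succ, PySem.List.enumerate_cons, List.map_cons, List.sum_cons, h1,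
      ih (g + 1) f]
    have h2 : ((g + 1 + c : Nat) : Int) = ((g + (c + 1) : Nat) : Int) := by push_cast; ring
    rw [h2]
    have h3 : ((g + 1 : Nat) : Int) = (g : Int) + 1 := by push_cast; ring
    rw [h3, pvTiers_succ (g : Int)]
    push_cast
    ring

lemma pv_decomp (f : Int) : ∀ (rest : List Int),
    (f :: rest).Pairwise (fun a b => b ≤ a) →
    ∃ (c : Nat) (t : List Int), f :: rest = List.replicate (c+1) f ++ t ∧
      (∀ x ∈ t, x < f) ∧ t.Pairwise (fun a b => b ≤ a) := by
  intro rest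
  induction rest with
  | nil => intro _; exact ⟨0, [], by simp, by simp, by simp⟩
  | cons y rs ih =>
    intro h
    by_cases hy : y = f
    · subst hy
      have h' : (y :: rs).Pairwise (fun a b => b ≤ a) := (List.pairwise_cons.mp h).2
      obtain ⟨c, t, heq, ht, hp⟩ := ih h'
      refine ⟨c + 1, t, ?_, ht, hp⟩
      rw [List.replicate_succ, List.cons_append, ← heq]
    · have h1 := List.pairwise_cons.mp h
      have hy' : y < f := lt_of_le_of_ne (h1.1 y (by simp)) hy
      refine ⟨0, y :: rs, by simp, ?_, h1.2⟩
      intro x hx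
      rcases List.mem_cons.mp hx with rfl | hx'
      · exact hy'
      · calc x ≤ y := (List.pairwise_cons.mp h1.2).1 x hx'
          _ < f := hy'

lemma pv_add_cons (f : Int) : ∀ (t s : List Int), f ∉ t →
    t.foldl PySem.Set.add (f :: s) = f :: t.foldl PySem.Set.add s := by
  intro t
  induction t with
  | nil => intro s _; rfl
  | cons x xs ih =>
    intro s hf
    have hxf : x ≠ f := fun h => hf (h ▸ List.mem_cons_self)
    have hrec := ih (PySem.Set.add s x) (fun h => hf (List.mem_cons_of_mem _ h))
    simp only [List.foldl_cons]
    rw [← hrec]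
    congr 1
    simp only [PySem.Set.add, PySem.Set.contains, List.contains_cons]
    have : (x == f) = false := by simp [hxf]
    rw [this]
    simp only [Bool.false_or]
    split <;> simp

lemma pv_dedup_rep (f : Int) : ∀ (c : Nat) (t : List Int), f ∉ t →
    PySem.List.dedup (List.replicate (c+1) f ++ t) = f :: PySem.List.dedup t := by
  intro c
  induction c with
  | zero =>
    intro t hf
    show PySem.Set.ofList (f :: t) = f :: PySem.Set.ofList t
    rw [PySem.Set.ofList_eq_foldl, PySem.Set.ofList_eq_foldl]
    simp only [List.foldl_cons]
    have he : PySem.Set.add ([] : List Int) f = [f] := rfl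
    rw [he]
    exact pv_add_cons f t [] hf
  | succ c ih =>
    intro t hf
    have h2 : List.replicate (c+1+1) f ++ t = f :: (List.replicate (c+1) f ++ t) := by
      simp [List.replicate_succ]
    rw [h2]
    show PySem.Set.ofList (f :: (List.replicate (c+1) f ++ t)) = f :: PySem.List.dedup t
    rw [PySem.Set.ofList_eq_foldl]
    simp only [List.foldl_cons]
    have he : PySem.Set.add ([] : List Int) f = [f] := rfl
    rw [he]
    have h3 : List.replicate (c+1) f ++ t = f :: (List.replicate c f ++ t) := by
      simp [List.replicate_succ]
    rw [h3, List.foldl_cons]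
    have he2 : PySem.Set.add [f] f = [f] := by simp [PySem.Set.add, PySem.Set.contains]
    rw [he2]
    have := ih t hf
    rw [show PySem.List.dedup (List.replicate (c+1) f ++ t)
        = (List.replicate (c+1) f ++ t).foldl PySem.Set.add [] from rfl] at this
    rw [h3, List.foldl_cons] at this
    have he3 : PySem.Set.add ([] : List Int) f = [f] := rfl
    rw [he3] at this
    exact this

lemma pv_ind_sum (x : Int) : ∀ (l : List Int), l.Nodup →
    (l.map (fun k => if k == x then (1:Int) else 0)).sum = if x ∈ l then 1 else 0 := by
  intro l
  induction l with
  | nil => simp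
  | cons y ys ih =>
    intro hnd
    obtain ⟨hy, hnd'⟩ := List.nodup_cons.mp hnd
    simp only [List.map_cons, List.sum_cons, ih hnd']
    by_cases h : y = x
    · subst h
      simp [hy]
    · have : (y == x) = false := by simp [h]
      rw [this]
      simp [List.mem_cons, Ne.symm h]

lemma pv_countP_eq_sum (p : Int → Bool) : ∀ (L : List Int) (d : List Int), d.Nodup →
    (∀ x ∈ L, x ∈ d) →
    ((d.filter p).map (fun k => (L.count k : Int))).sum = (L.countP p : Int) := by
  intro L
  induction L with
  | nil => intro d _ _; simp
  | cons x L' ih =>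
    intro d hnd hmem
    have hx : x ∈ d := hmem x (by simp)
    have hmem' : ∀ y ∈ L', y ∈ d := fun y hy => hmem y (List.mem_cons_of_mem _ hy)
    have hsplit : ∀ k : Int, ((x :: L').count k : Int)
        = (L'.count k : Int) + (if k == x then 1 else 0) := by
      intro k
      rw [List.count_cons]
      push_cast
      rcases eq_or_ne k x with rfl | hkx
      · simp
      · simp [hkx, Ne.symm hkx]
    calc ((d.filter p).map (fun k => ((x :: L').count k : Int))).sum
        = ((d.filter p).map (fun k => (L'.count k : Int) + (if k == x then 1 else 0))).sum := by
          congr 1; exact List.map_congr_left (fun k _ => hsplit k)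
      _ = ((d.filter p).map (fun k => (L'.count k : Int))).sum
          + ((d.filter p).map (fun k => if k == x then (1:Int) else 0)).sum := by
          rw [← List.sum_map_add]
      _ = (L'.countP p : Int) + (if x ∈ d.filter p then 1 else 0) := by
          rw [ih d hnd hmem', pv_ind_sum x (d.filter p) (hnd.filter p)]
      _ = ((x :: L').countP p : Int) := by
          rw [List.countP_cons]
          by_cases hp : p x
          · have : x ∈ d.filter p := List.mem_filter.mpr ⟨hx, hp⟩
            simp [this, hp]
          · have : x ∉ d.filter p := fun h => hp (List.of_mem_filter h)
            simp [this, hp]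

lemma pv_main : ∀ (n : Nat) (vs : List Int), vs.length ≤ n →
    vs.Pairwise (fun a b => b ≤ a) → ∀ (g : Nat),
    ((PySem.List.enumerate vs (g : Int)).map
      (fun ic => ic.2 * (PySem.Int.floordiv ic.1 8 + 1))).sum
    = ((PySem.List.dedup vs).map (fun f =>
        f * ((vs.count f : Int)
          + pvTiers ((g + vs.countP (fun x => decide (f < x)) + vs.count f : Nat) : Int)
          - pvTiers ((g + vs.countP (fun x => decide (f < x)) : Nat) : Int)))).sum := by
  intro n
  induction n with
  | zero =>
    intro vs hlen _ g
    have : vs = [] := List.eq_nil_of_length_eq_zero (Nat.le_zero.mp hlen)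
    subst this
    simp [PySem.List.enumerate_nil, PySem.List.dedup]
  | succ n ih =>
    intro vs hlen hpw g
    rcases vs with _ | ⟨f, rest⟩
    · simp [PySem.List.enumerate_nil, PySem.List.dedup]
    obtain ⟨c, t, heq, ht, hp⟩ := pv_decomp f rest hpw
    have hfnott : f ∉ t := fun h => lt_irrefl f (ht f h)
    rw [heq]
    -- LHS
    rw [PySem.List.enumerate_append, List.map_append, List.sum_append]
    rw [pv_block_sum (c+1) g f]
    have hcast : (g : Int) + ((List.replicate (c+1) f).length : Int) = ((g + (c+1) : Nat) : Int) := by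
      push_cast; simp
    rw [hcast]
    have hlent : t.length ≤ n := by
      rw [heq] at hlen
      simp [List.length_append, List.length_replicate] at hlen
      omega
    rw [ih t hlent hp (g + (c+1))]
    -- RHS
    rw [pv_dedup_rep f c t hfnott]
    rw [List.map_cons, List.sum_cons]
    -- head term
    have hcount_f : (List.replicate (c+1) f ++ t).count f = c + 1 := by
      rw [List.count_append, List.count_replicate]
      simp [List.count_eq_zero.mpr hfnott]
    have hcountP_f : (List.replicate (c+1) f ++ t).countP (fun x => decide (f < x)) = 0 := by
      rw [List.countP_append, List.countP_replicate]
      simp only [decide_eq_true_eq, lt_irrefl, if_false]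
      have : t.countP (fun x => decide (f < x)) = 0 := by
        rw [List.countP_eq_zero]
        intro x hx
        simp only [decide_eq_true_eq]
        exact not_lt.mpr (le_of_lt (ht x hx))
      omega
    rw [hcount_f, hcountP_f]
    -- tail terms
    congr 1
    congr 1
    apply List.map_congr_left
    intro f' hf'
    have hf't : f' ∈ t := by simpa using hf'
    have hf'lt : f' < f := ht f' hf't
    have hcount' : (List.replicate (c+1) f ++ t).count f' = t.count f' := by
      rw [List.count_append, List.count_replicate]
      simp [ne_of_gt hf'lt]
    have hcountP' : (List.replicate (c+1) f ++ t).countP (fun x => decide (f' < x))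
        = (c+1) + t.countP (fun x => decide (f' < x)) := by
      rw [List.countP_append, List.countP_replicate]
      simp [hf'lt]
    rw [hcount', hcountP']
    set X := t.countP (fun x => decide (f' < x)) with hX
    set Y := t.count f' with hY
    have e1 : g + (c + 1 + X) + Y = g + (c + 1) + X + Y := by omega
    have e2 : g + (c + 1 + X) = g + (c + 1) + X := by omega
    rw [e1, e2]

lemma pv_final (word : String) : minimum_pushes_v2 word = minimum_pushes_v2_alt word := by
  unfold minimum_pushes_v2 minimum_pushes_v2_alt
  simp only []
  set L := (PySem.Dict.counter word.toList).values with hL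
  set vs := PySem.List.sorted L id true with hvs
  -- A side: the loop is a sum, and pv_main turns it into the per-distinct-value form
  rw [PySem.List.foldl_add (g := fun ic : Int × Int => ic.2 * (PySem.Int.floordiv ic.1 8 + 1))]
  have h0 : (PySem.List.enumerate vs 0) = (PySem.List.enumerate vs ((0 : Nat) : Int)) := by norm_num
  rw [h0, pv_main vs.length vs (le_refl _)
        (by simpa using PySem.List.sorted_pairwise_rev (xs := L) (key := id)) 0]
  -- B side: the loop is a sum
  rw [PySem.List.foldl_add (g := fun fc : Int × Int =>
      fc.1 * (fc.2 + pvTiers (pvGreaterSum (PySem.Dict.counter L) fc.1 + fc.2)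
        - pvTiers (pvGreaterSum (PySem.Dict.counter L) fc.1)))]
  simp only [zero_add]
  -- B's items and the generator sums, in terms of counts over L
  have hitems : (PySem.Dict.counter L).items
      = (PySem.Set.ofList L).map (fun k => (k, (L.count k : Int))) := PySem.Dict.items_counter L
  have hg : ∀ f : Int, pvGreaterSum (PySem.Dict.counter L) f
      = (L.countP (fun x => decide (f < x)) : Int) := by
    intro f
    unfold pvGreaterSum
    rw [hitems, List.filter_map, List.map_map]
    have : ((PySem.Set.ofList L).filter ((fun p => decide (f < p.1)) ∘ (fun k => (k, (L.count k : Int))))).map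
        ((fun p => p.2) ∘ (fun k => (k, (L.count k : Int))))
        = (((PySem.Set.ofList L).filter (fun x => decide (f < x))).map (fun k => (L.count k : Int))) := by
      congr 1
    rw [this]
    exact pv_countP_eq_sum _ L (PySem.Set.ofList L) (PySem.Set.nodup_ofList L)
      (fun x hx => (PySem.Set.mem_ofList L x).mpr hx)
  -- common per-distinct-value form
  set h : Int → Int := fun k => k * ((L.count k : Int)
    + pvTiers ((L.countP (fun x => decide (k < x)) : Int) + (L.count k : Int))
    - pvTiers ((L.countP (fun x => decide (k < x)) : Int))) with hh
  have hperm : vs.Perm L := PySem.List.sorted_perm L id true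
  have hofperm : (PySem.Set.ofList vs).Perm (PySem.Set.ofList L) := by
    refine (List.perm_ext_iff_of_nodup (PySem.Set.nodup_ofList vs) (PySem.Set.nodup_ofList L)).mpr ?_
    intro x
    rw [PySem.Set.mem_ofList, PySem.Set.mem_ofList]
    exact hperm.mem_iff
  have hA : ((PySem.List.dedup vs).map (fun f =>
        f * ((vs.count f : Int)
          + pvTiers ((vs.countP (fun x => decide (f < x)) + vs.count f : Nat) : Int)
          - pvTiers ((vs.countP (fun x => decide (f < x)) : Nat) : Int)))).sum
      = ((PySem.Set.ofList vs).map h).sum := by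
    rw [PySem.List.dedup_eq_ofList]
    congr 1
    apply List.map_congr_left
    intro f _
    rw [hperm.count_eq, hperm.countP_eq, hh]
    push_cast
    ring_nf
  have hB : (((PySem.Set.ofList L).map (fun k => (k, (L.count k : Int)))).map
        (fun fc : Int × Int =>
          fc.1 * (fc.2 + pvTiers (pvGreaterSum (PySem.Dict.counter L) fc.1 + fc.2)
            - pvTiers (pvGreaterSum (PySem.Dict.counter L) fc.1)))).sum
      = ((PySem.Set.ofList L).map h).sum := by
    rw [List.map_map]
    congr 1
    apply List.map_congr_left
    intro k _
    simp only [Function.comp_apply, hg k, hh]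
  rw [hA, hitems, hB]
  exact (hofperm.map h).sum_eq

-- ===== VERDICT (by name: the statement is the Claim_ definition above) =====
theorem minimum_pushes_v2_spec : Claim_equal_minimum_pushes_v2 := by
  intro word _
  exact pv_final word
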